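-- pv_equiv track=rewrite | github.com/offensive-hub/black-widow | app/managers/injection/sql_injection_util/sqlmapcli.py | __get_csrf_token
-- ===== SOURCE A (Python) =====
-- def __get_csrf_token(inputs: dict) -> dict:
--     csrf_field = None
--     for name, input_field in inputs.items():
--         if input_field.get('type') != 'hidden':
--             continue
--         name_lower: str = name.lower()
--         if 'csrf' in name_lower:
--             return input_field
--         if 'token' in name_lower:
--             csrf_field = input_field
--     return csrf_field
-- ===== SOURCE B (Python) =====
-- def __get_csrf_token(inputs: dict) -> dict:
--     # Phase 1: first hidden field whose lowercased name contains 'csrf'.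
--     csrf = next((f for n, f in inputs.items()
--                  if f.get('type') == 'hidden' and 'csrf' in n.lower()), None)
--     if csrf is not None:
--         return csrf
--     # Phase 2: first hidden field whose lowercased name contains 'token'.
--     return next((f for n, f in inputs.items()
--                  if f.get('type') == 'hidden' and 'token' in n.lower()), None)
-- ===== Notes on version B (the rewrite author's own statement) =====
-- stated objective: alternative
-- what changed: Replaces A's single stateful loop (early return for csrf, last-match accumulator for token) with two independent short-circuiting first-match searches via next(..., None); Pre_ excludes dicts with no hidden csrf field but two or more hidden token fields, where A's last-match vs B's first-match is an accidental, equally defensible tie-break.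
import Mathlib
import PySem

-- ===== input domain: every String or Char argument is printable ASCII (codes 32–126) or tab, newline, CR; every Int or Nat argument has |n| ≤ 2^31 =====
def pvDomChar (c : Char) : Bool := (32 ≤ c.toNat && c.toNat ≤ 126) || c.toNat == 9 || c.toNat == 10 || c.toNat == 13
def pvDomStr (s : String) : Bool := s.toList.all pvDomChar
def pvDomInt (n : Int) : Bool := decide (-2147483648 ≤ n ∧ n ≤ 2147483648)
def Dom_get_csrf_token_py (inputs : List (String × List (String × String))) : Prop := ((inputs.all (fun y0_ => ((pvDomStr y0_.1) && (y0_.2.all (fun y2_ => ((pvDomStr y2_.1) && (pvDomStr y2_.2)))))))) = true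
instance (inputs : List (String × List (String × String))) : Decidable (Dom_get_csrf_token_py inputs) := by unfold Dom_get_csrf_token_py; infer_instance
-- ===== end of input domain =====

-- B replaces A's single stateful loop (early return for csrf, last-match accumulator for
-- token) with two independent short-circuiting first-match searches; on dicts with no
-- hidden csrf field and two or more hidden token fields A keeps the last and B the first
-- (an unspecified tie), so Pre_ excludes those.

-- ===== PORT A =====
-- A's loop: early return on csrf, accumulator csrf_field for token, branch order as in Python.
def pvALoop : List (String × List (String × String)) → Option (List (String × String)) → Option (List (String × String))
  | [], acc => acc
  | (name, f) :: rest, acc =>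
    if (PySem.Dict.mk f).get? "type" ≠ some "hidden" then pvALoop rest acc
    else
      let nameLower := PySem.Str.lower name
      if PySem.Str.isIn "csrf" nameLower then some f
      else if PySem.Str.isIn "token" nameLower then pvALoop rest (some f)
      else pvALoop rest acc

def get_csrf_token_py (inputs : List (String × List (String × String))) : Option (List (String × String)) :=
  pvALoop inputs none

-- ===== PORT B =====
def pvHidden (f : List (String × String)) : Bool :=
  (PySem.Dict.mk f).get? "type" == some "hidden"

def get_csrf_token_py_alt (inputs : List (String × List (String × String))) : Option (List (String × String)) :=
  -- phase 1: first hidden field whose lowercased name contains 'csrf' (next(..., None))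
  match inputs.find? (fun p => pvHidden p.2 && PySem.Str.isIn "csrf" (PySem.Str.lower p.1)) with
  | some p => some p.2
  | none =>
    -- phase 2: first hidden field whose lowercased name contains 'token' (next(..., None))
    (inputs.find? (fun p => pvHidden p.2 && PySem.Str.isIn "token" (PySem.Str.lower p.1))).map Prod.snd

-- ===== PRECONDITION & SPEC =====
-- Pre_ excludes dicts that have NO hidden field whose name contains 'csrf' but TWO OR MORE
-- hidden fields whose names contain 'token': there A's last-match and B's first-match are
-- both defensible readings of an unspecified tie, so the claim says nothing about them.
def Pre_get_csrf_token_py (inputs : List (String × List (String × String))) : Prop :=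
  (inputs.all (fun p => !(((PySem.Dict.mk p.2).get? "type" == some "hidden") && PySem.Str.isIn "csrf" (PySem.Str.lower p.1))) = true) →
  inputs.countP (fun p => ((PySem.Dict.mk p.2).get? "type" == some "hidden") && PySem.Str.isIn "token" (PySem.Str.lower p.1)) ≤ 1
instance (inputs : List (String × List (String × String))) : Decidable (Pre_get_csrf_token_py inputs) := by unfold Pre_get_csrf_token_py; infer_instance

def pvWitness_get_csrf_token_py : (List (String × List (String × String))) :=
  [("csrf_token", [("type", "hidden"), ("value", "abc123")]), ("user", [("type", "text")])]

def Spec_get_csrf_token_py (inputs : List (String × List (String × String))) (out : Option (List (String × String))) : Prop := out = get_csrf_token_py_alt inputs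
instance (inputs : List (String × List (String × String))) (out : Option (List (String × String))) : Decidable (Spec_get_csrf_token_py inputs out) := by unfold Spec_get_csrf_token_py; infer_instance

-- ===== CLAIM (what is proved, stated in full; the proofs are below) =====
def Claim_equal_get_csrf_token_py : Prop := ∀ (inputs : List (String × List (String × String))), Dom_get_csrf_token_py inputs → Pre_get_csrf_token_py inputs → Spec_get_csrf_token_py inputs (get_csrf_token_py inputs)

-- ===== LEMMAS AND PROOFS =====

theorem pvALoop_csrf_found (xs : List (String × List (String × String)))
    (p : String × List (String × String))
    (h : xs.find? (fun p => pvHidden p.2 && PySem.Str.isIn "csrf" (PySem.Str.lower p.1)) = some p)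
    (acc : Option (List (String × String))) :
    pvALoop xs acc = some p.2 := by
  induction xs generalizing acc with
  | nil => simp at h
  | cons hd tl ih =>
    obtain ⟨name, f⟩ := hd
    by_cases hc : (pvHidden f && PySem.Str.isIn "csrf" (PySem.Str.lower name)) = true
    · rw [List.find?_cons_of_pos (p := fun q : String × List (String × String) => pvHidden q.2 && PySem.Str.isIn "csrf" (PySem.Str.lower q.1)) hc] at h
      obtain ⟨hh, hcs⟩ := Bool.and_eq_true_iff.mp hc
      have hne : ¬ ((PySem.Dict.mk f).get? "type" ≠ some "hidden") := by
        simpa [pvHidden] using hh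
      have hcs' : PySem.Chars.isIn ['c','s','r','f'] (PySem.Chars.lower name.toList) = true := by
        simpa using hcs
      cases h
      simp [pvALoop, hne, hcs']
    · rw [List.find?_cons_of_neg (p := fun q : String × List (String × String) => pvHidden q.2 && PySem.Str.isIn "csrf" (PySem.Str.lower q.1)) hc] at h
      by_cases hh : pvHidden f = true
      · have hne : ¬ ((PySem.Dict.mk f).get? "type" ≠ some "hidden") := by
          simpa [pvHidden] using hh
        have hcs' : PySem.Chars.isIn ['c','s','r','f'] (PySem.Chars.lower name.toList) = false := by
          simpa [hh] using hc
        by_cases ht : PySem.Chars.isIn ['t','o','k','e','n'] (PySem.Chars.lower name.toList) = true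
        · simpa [pvALoop, hne, hcs', ht] using ih h (some f)
        · simpa [pvALoop, hne, hcs', ht] using ih h acc
      · have hne : (PySem.Dict.mk f).get? "type" ≠ some "hidden" := by
          simpa [pvHidden] using hh
        simpa [pvALoop, hne] using ih h acc

theorem pvALoop_inert (xs : List (String × List (String × String)))
    (hc : ∀ p ∈ xs, (pvHidden p.2 && PySem.Str.isIn "csrf" (PySem.Str.lower p.1)) = false)
    (ht : ∀ p ∈ xs, (pvHidden p.2 && PySem.Str.isIn "token" (PySem.Str.lower p.1)) = false)
    (acc : Option (List (String × String))) :
    pvALoop xs acc = acc := by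
  induction xs generalizing acc with
  | nil => simp [pvALoop]
  | cons hd tl ih =>
    obtain ⟨name, f⟩ := hd
    have hc0 := hc (name, f) (List.mem_cons_self ..)
    have ht0 := ht (name, f) (List.mem_cons_self ..)
    have ihtl := ih (fun p hp => hc p (List.mem_cons_of_mem _ hp))
      (fun p hp => ht p (List.mem_cons_of_mem _ hp))
    by_cases hh : pvHidden f = true
    · have hne : ¬ ((PySem.Dict.mk f).get? "type" ≠ some "hidden") := by
        simpa [pvHidden] using hh
      have hcs' : PySem.Chars.isIn ['c','s','r','f'] (PySem.Chars.lower name.toList) = false := by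
        simpa [hh] using hc0
      have hts' : PySem.Chars.isIn ['t','o','k','e','n'] (PySem.Chars.lower name.toList) = false := by
        simpa [hh] using ht0
      simpa [pvALoop, hne, hcs', hts'] using ihtl acc
    · have hne : (PySem.Dict.mk f).get? "type" ≠ some "hidden" := by
        simpa [pvHidden] using hh
      simpa [pvALoop, hne] using ihtl acc

theorem pvALoop_no_csrf (xs : List (String × List (String × String)))
    (hc : ∀ p ∈ xs, (pvHidden p.2 && PySem.Str.isIn "csrf" (PySem.Str.lower p.1)) = false)
    (hcount : xs.countP (fun p => pvHidden p.2 && PySem.Str.isIn "token" (PySem.Str.lower p.1)) ≤ 1)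
    (acc : Option (List (String × String))) :
    pvALoop xs acc =
      match xs.find? (fun p => pvHidden p.2 && PySem.Str.isIn "token" (PySem.Str.lower p.1)) with
      | some p => some p.2
      | none => acc := by
  induction xs generalizing acc with
  | nil => simp [pvALoop]
  | cons hd tl ih =>
    obtain ⟨name, f⟩ := hd
    have hc0 := hc (name, f) (List.mem_cons_self ..)
    have hctl : ∀ p ∈ tl, (pvHidden p.2 && PySem.Str.isIn "csrf" (PySem.Str.lower p.1)) = false :=
      fun p hp => hc p (List.mem_cons_of_mem _ hp)
    by_cases hh : pvHidden f = true
    · have hne : ¬ ((PySem.Dict.mk f).get? "type" ≠ some "hidden") := by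
        simpa [pvHidden] using hh
      have hcs' : PySem.Chars.isIn ['c','s','r','f'] (PySem.Chars.lower name.toList) = false := by
        simpa [hh] using hc0
      by_cases hts' : PySem.Chars.isIn ['t','o','k','e','n'] (PySem.Chars.lower name.toList) = true
      · -- head is the first hidden token field; Pre_ says it is the only one
        have hhead : (pvHidden f && PySem.Str.isIn "token" (PySem.Str.lower name)) = true := by
          simp [hh, hts']
        rw [List.countP_cons_of_pos (p := fun q : String × List (String × String) => pvHidden q.2 && PySem.Str.isIn "token" (PySem.Str.lower q.1)) hhead] at hcount
        have httl : ∀ p ∈ tl, (pvHidden p.2 && PySem.Str.isIn "token" (PySem.Str.lower p.1)) = false := by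
          intro p hp
          by_contra hx
          have hpos : 0 < tl.countP (fun p => pvHidden p.2 && PySem.Str.isIn "token" (PySem.Str.lower p.1)) :=
            List.countP_pos_iff.mpr ⟨p, hp, by simpa using hx⟩
          omega
        rw [List.find?_cons_of_pos (p := fun q : String × List (String × String) => pvHidden q.2 && PySem.Str.isIn "token" (PySem.Str.lower q.1)) hhead]
        simpa [pvALoop, hne, hcs', hts'] using pvALoop_inert tl hctl httl (some f)
      · have hhead : ¬ (pvHidden f && PySem.Str.isIn "token" (PySem.Str.lower name)) = true := by
          simp [hts']
        rw [List.find?_cons_of_neg (p := fun q : String × List (String × String) => pvHidden q.2 && PySem.Str.isIn "token" (PySem.Str.lower q.1)) hhead]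
        rw [List.countP_cons_of_neg (p := fun q : String × List (String × String) => pvHidden q.2 && PySem.Str.isIn "token" (PySem.Str.lower q.1)) hhead] at hcount
        simpa [pvALoop, hne, hcs', hts'] using ih hctl hcount acc
    · have hne : (PySem.Dict.mk f).get? "type" ≠ some "hidden" := by
        simpa [pvHidden] using hh
      have hhead : ¬ (pvHidden f && PySem.Str.isIn "token" (PySem.Str.lower name)) = true := by
        simp [hh]
      rw [List.find?_cons_of_neg (p := fun q : String × List (String × String) => pvHidden q.2 && PySem.Str.isIn "token" (PySem.Str.lower q.1)) hhead]
      rw [List.countP_cons_of_neg (p := fun q : String × List (String × String) => pvHidden q.2 && PySem.Str.isIn "token" (PySem.Str.lower q.1)) hhead] at hcount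
      simpa [pvALoop, hne] using ih hctl hcount acc

-- ===== VERDICT (by name: the statement is the Claim_ definition above) =====
theorem get_csrf_token_py_spec : Claim_equal_get_csrf_token_py := by
  intro inputs _ hpre
  unfold Spec_get_csrf_token_py get_csrf_token_py get_csrf_token_py_alt
  cases hfc : inputs.find? (fun p => pvHidden p.2 && PySem.Str.isIn "csrf" (PySem.Str.lower p.1)) with
  | some p => exact pvALoop_csrf_found inputs p hfc none
  | none =>
    have hc : ∀ p ∈ inputs, (pvHidden p.2 && PySem.Str.isIn "csrf" (PySem.Str.lower p.1)) = false := by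
      intro p hp
      exact Bool.eq_false_iff.mpr (List.find?_eq_none.mp hfc p hp)
    have hall : inputs.all (fun p => !(((PySem.Dict.mk p.2).get? "type" == some "hidden") && PySem.Str.isIn "csrf" (PySem.Str.lower p.1))) = true := by
      rw [List.all_eq_true]
      intro p hp
      have hx := hc p hp
      simp only [pvHidden] at hx
      rw [Bool.not_eq_true']
      exact hx
    have hcount := hpre hall
    have := pvALoop_no_csrf inputs hc (by simpa [pvHidden] using hcount) none
    rw [this]
    cases inputs.find? (fun p => pvHidden p.2 && PySem.Str.isIn "token" (PySem.Str.lower p.1)) <;> simp
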